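-- pv_equiv track=rewrite | github.com/BurningTiles/dailycoding | 2021-12-18/solution.py | count
-- ===== SOURCE A (Python) =====
-- def count(digits, n):
-- 	num, ns, ds = str(n), len(str(n)), len(digits)
-- 	ans = sum(pow(ds, i) for i in range(1, ns))
-- 	for i in range(ns):
-- 		j=0
-- 		while j<ds and digits[j]<num[i]:
-- 			ans += pow(ds, ns-i-1)
-- 			j += 1
-- 		if j>=ds or digits[j]!=num[i]: return ans
-- 	return ans+1
-- ===== SOURCE B (Python) =====
-- def count(digits, n):
--     # Right-to-left DP over the decimal string: res = count of equal-length strings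
--     # over `digits` that are <= the current suffix; powers maintained incrementally.
--     num = str(n)
--     ds = len(digits)
--     res, power, shorter = 1, 1, 0
--     for k, c in enumerate(reversed(num)):
--         if k > 0:
--             shorter += power
--         lt = 0
--         while lt < ds and digits[lt] < c:
--             lt += 1
--         res = lt * power + (res if lt < ds and digits[lt] == c else 0)
--         power *= ds
--     return shorter + res
-- ===== Notes on version B (the rewrite author's own statement) =====
-- stated objective: alternative
-- what changed: Replaces A's left-to-right scan with early returns and a pow(ds, ns-i-1) recomputation on every inner-loop step by a single right-to-left DP pass over the decimal string that maintains the power and the shorter-length total incrementally with one multiplication per position.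
import Mathlib
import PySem

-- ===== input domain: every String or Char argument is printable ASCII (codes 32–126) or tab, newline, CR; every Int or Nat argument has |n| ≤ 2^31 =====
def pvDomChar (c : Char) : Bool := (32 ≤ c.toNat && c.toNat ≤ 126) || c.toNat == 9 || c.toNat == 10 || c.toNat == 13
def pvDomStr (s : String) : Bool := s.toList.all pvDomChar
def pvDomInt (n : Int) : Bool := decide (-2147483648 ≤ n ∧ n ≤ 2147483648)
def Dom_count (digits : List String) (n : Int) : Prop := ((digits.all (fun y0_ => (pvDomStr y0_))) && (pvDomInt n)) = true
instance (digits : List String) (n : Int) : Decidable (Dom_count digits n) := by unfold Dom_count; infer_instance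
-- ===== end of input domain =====

-- B replaces A's left-to-right early-return scan (with a pow() per step) by a single
-- right-to-left DP pass that maintains the power incrementally (objective: alternative).

-- ===== PORT A =====
-- the inner `while j<ds and digits[j]<num[i]: ans += pow(ds,ns-i-1); j+=1` loop:
-- recursion over the suffix of `digits` starting at j, accumulating into ans;
-- returns (ans, remaining suffix) so the `j>=ds or digits[j]!=num[i]` test can be made.
def countWhileA (l : List String) (c : Char) (p : Int) (ans : Int) : Int × List String :=
  match l with
  | [] => (ans, [])
  | d :: rest =>
    if PySem.Chars.strLt d.toList [c] then countWhileA rest c p (ans + p)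
    else (ans, d :: rest)

-- the `for i in range(ns)` loop; the exponent ns-i-1 is the length of the remaining
-- suffix minus 1, i.e. cs.length for `c :: cs`.
def countLoopA (digits : List String) (ds : Int) : List Char → Int → Int
  | [], ans => ans + 1
  | c :: cs, ans =>
    let r := countWhileA digits c (ds ^ cs.length) ans
    match r.2 with
    | [] => r.1                      -- j >= ds
    | d :: _ => if d ≠ String.singleton c then r.1 else countLoopA digits ds cs r.1

def count (digits : List String) (n : Int) : Int :=
  let num := (PySem.Int.toStr n).toList
  let ns : Int := num.length
  let ds : Int := digits.length
  let ans := (PySem.List.pyRange 1 ns 1).foldl (fun acc i => acc + ds ^ i.toNat) 0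
  countLoopA digits ds num ans

-- ===== PORT B =====
-- the inner `while lt < ds and digits[lt] < c: lt += 1` loop of Source B; returns
-- (lt, remaining suffix) so `lt < ds and digits[lt] == c` can be tested.
def scanB (l : List String) (c : Char) (lt : Int) : Int × List String :=
  match l with
  | [] => (lt, [])
  | d :: rest =>
    if PySem.Chars.strLt d.toList [c] then scanB rest c (lt + 1)
    else (lt, d :: rest)

-- one iteration of Source B's `for k, c in enumerate(reversed(num))` loop;
-- state = (res, power, shorter, k)
def stepB (digits : List String) (ds : Int) (st : Int × Int × Int × Int) (c : Char) :
    Int × Int × Int × Int :=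
  let shorter := if st.2.2.2 > 0 then st.2.2.1 + st.2.1 else st.2.2.1
  let s := scanB digits c 0
  let eq : Bool := match s.2 with
    | d :: _ => d == String.singleton c
    | [] => false
  (s.1 * st.2.1 + (if eq then st.1 else 0), st.2.1 * ds, shorter, st.2.2.2 + 1)

def count_alt (digits : List String) (n : Int) : Int :=
  let num := (PySem.Int.toStr n).toList
  let ds : Int := digits.length
  let st := num.reverse.foldl (stepB digits ds) (1, 1, 0, 0)
  st.2.2.1 + st.1

-- ===== PRECONDITION & SPEC =====
def Spec_count (digits : List String) (n : Int) (out : Int) : Prop := out = count_alt digits n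
instance (digits : List String) (n : Int) (out : Int) : Decidable (Spec_count digits n out) := by unfold Spec_count; infer_instance

-- ===== CLAIM (what is proved, stated in full; the proofs are below) =====
def Claim_equal_count : Prop := ∀ (digits : List String) (n : Int), Dom_count digits n → Spec_count digits n (count digits n)

-- ===== LEMMAS AND PROOFS =====

-- pure characterisations of the inner scans
def ltN (l : List String) (c : Char) : Int :=
  match l with
  | [] => 0
  | d :: rest => if PySem.Chars.strLt d.toList [c] then 1 + ltN rest c else 0

def remF (l : List String) (c : Char) : List String :=
  match l with
  | [] => []
  | d :: rest => if PySem.Chars.strLt d.toList [c] then remF rest c else d :: rest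

theorem countWhileA_eq (l : List String) (c : Char) (p ans : Int) :
    countWhileA l c p ans = (ans + ltN l c * p, remF l c) := by
  induction l generalizing ans with
  | nil => simp [countWhileA, ltN, remF]
  | cons d rest ih =>
    simp only [countWhileA, ltN, remF]
    split_ifs with h
    · rw [ih]; ring_nf
    · simp

theorem scanB_eq (l : List String) (c : Char) (lt : Int) :
    scanB l c lt = (lt + ltN l c, remF l c) := by
  induction l generalizing lt with
  | nil => simp [scanB, ltN, remF]
  | cons d rest ih =>
    simp only [scanB, ltN, remF]
    split_ifs with h
    · rw [ih]; ring_nf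
    · simp

-- the common recursive value both loops compute for a decimal-string suffix
def R (digits : List String) (ds : Int) : List Char → Int
  | [] => 1
  | c :: cs =>
    ltN digits c * ds ^ cs.length +
      (match remF digits c with
       | d :: _ => if d = String.singleton c then R digits ds cs else 0
       | [] => 0)

theorem countLoopA_eq (digits : List String) (ds : Int) (cs : List Char) (ans : Int) :
    countLoopA digits ds cs ans = ans + R digits ds cs := by
  induction cs generalizing ans with
  | nil => simp [countLoopA, R]
  | cons c cs ih =>
    simp only [countLoopA, countWhileA_eq, R]
    cases h : remF digits c with
    | nil => simp
    | cons d rest =>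
      by_cases hd : d = String.singleton c
      · simp [hd, ih]; ring
      · simp [hd]

-- geometric accumulator: S ds m = Σ_{k=1}^{m-1} ds^k
def S (ds : Int) : Nat → Int
  | 0 => 0
  | m + 1 => S ds m + (if m = 0 then 0 else ds ^ m)

theorem if_eq_match (digits : List String) (c : Char) (x : Int) :
    (if (match remF digits c with
         | d :: _ => d == String.singleton c
         | [] => false) = true then x else (0:Int)) =
      (match remF digits c with
       | d :: _ => if d = String.singleton c then x else 0
       | [] => 0) := by
  cases remF digits c with
  | nil => simp
  | cons d rest => simp [beq_iff_eq]

theorem foldl_stepB_reverse (digits : List String) (ds : Int) (cs : List Char) :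
    cs.reverse.foldl (stepB digits ds) (1, 1, 0, 0) =
      (R digits ds cs, ds ^ cs.length, S ds cs.length, (cs.length : Int)) := by
  induction cs with
  | nil => simp [R, S]
  | cons c cs ih =>
    rw [List.reverse_cons, List.foldl_append, ih, List.foldl_cons, List.foldl_nil]
    simp only [stepB, scanB_eq, R, S, List.length_cons, Prod.mk.injEq, zero_add]
    refine ⟨?_, ?_, ?_, ?_⟩
    · rw [← if_eq_match]
    · ring
    · by_cases h : cs.length = 0
      · simp [h, S]
      · simp [h]
    · push_cast; ring

theorem foldl_pyRange_geom (ds : Int) (ns : Nat) :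
    (PySem.List.pyRange 1 (ns : Int) 1).foldl (fun acc i => acc + ds ^ i.toNat) 0 = S ds ns := by
  induction ns with
  | zero => simp [PySem.List.pyRange_one_eq_nil, S]
  | succ m ih =>
    cases m with
    | zero => simp [PySem.List.pyRange_one_eq_nil, S]
    | succ k =>
      have h1 : (1 : Int) ≤ ((k + 1 : Nat) : Int) := by push_cast; omega
      have h2 : ((k + 1 : Nat) : Int) + 1 = ((k + 2 : Nat) : Int) := by push_cast; ring
      rw [← h2, PySem.List.pyRange_one_succ_right h1, List.foldl_append, ih]
      simp [S]

-- ===== VERDICT (by name: the statement is the Claim_ definition above) =====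
theorem count_spec : Claim_equal_count := by
  intro digits n _
  unfold Spec_count count count_alt
  simp only [foldl_stepB_reverse, countLoopA_eq, foldl_pyRange_geom]
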